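-- pv_equiv track=rewrite | github.com/thinkle/gourmet | grm-db-experiments/build/lib/gourmet/treeview_extras.py | path_compare
-- ===== SOURCE A (Python) =====
-- def path_compare (p1, p2):
--     """Return 1 if p1 > p2, 0 if p1 = p2 and -1 if p1 < p2
--     Greater than means comes after."""
--     flag = True
--     retval = None
--     n = 0
--     while flag:
--         if len(p1)>n and len(p2)>n:
--             if p1[n] > p2[n]:
--                 retval=1
--                 flag=False
--             elif p1[n] < p2[n]:
--                 retval=-1
--                 flag=False
--             else: flag=True
--         elif len(p1)<=n and len(p2)<=n:
--             ## if we're both too short, we're done comparing and we're equal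
--             retval=0
--             flag=False
--         else:
--             ## otherwise one of these is greater (the longer path comes after/is greater than the shorter)
--             if len(p1) > len(p2):
--                 retval=1
--                 flag=False
--             else:
--                 retval=-1
--                 flag=False
--         n += 1
--     return retval
-- ===== SOURCE B (Python) =====
-- def path_compare(p1, p2):
--     """Return 1 if p1 > p2, 0 if p1 = p2 and -1 if p1 < p2
--     Greater than means comes after."""
--     return (p1 > p2) - (p1 < p2)
-- ===== Notes on version B (the rewrite author's own statement) =====
-- stated objective: idiomatic
-- what changed: Replaces the while-loop/flag/index machinery with the closed-form expression (p1 > p2) - (p1 < p2), using Python's built-in lexicographic sequence comparison; no loop state or indexing remains.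
import Mathlib
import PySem

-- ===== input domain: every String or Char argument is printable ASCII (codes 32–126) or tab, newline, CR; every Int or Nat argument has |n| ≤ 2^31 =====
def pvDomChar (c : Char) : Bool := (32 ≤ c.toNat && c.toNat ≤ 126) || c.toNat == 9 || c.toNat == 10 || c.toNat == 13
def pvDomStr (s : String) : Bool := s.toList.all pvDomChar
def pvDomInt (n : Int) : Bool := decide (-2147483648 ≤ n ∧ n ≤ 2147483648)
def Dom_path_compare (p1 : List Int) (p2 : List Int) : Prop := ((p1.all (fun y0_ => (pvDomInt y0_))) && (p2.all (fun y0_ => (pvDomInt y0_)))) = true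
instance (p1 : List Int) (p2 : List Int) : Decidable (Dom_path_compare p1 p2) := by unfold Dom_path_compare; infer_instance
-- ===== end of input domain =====

-- B replaces A's while-loop/flag/index machinery with the closed form (p1 > p2) - (p1 < p2)
-- via Python's built-in lexicographic sequence comparison (objective: idiomatic).


-- ===== PORT A =====
-- A's while loop advances index n over both lists; each iteration looks only at the
-- heads beyond n, so the loop is ported as structural recursion on both lists, with
-- the three branches in A's order (both long enough / both exhausted / one longer).
def path_compare (p1 : List Int) (p2 : List Int) : Int :=
  match p1, p2 with
  | a :: as, b :: bs =>
      if a > b then 1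
      else if a < b then -1
      else path_compare as bs
  | [], [] => 0
  | p1, p2 => if p1.length > p2.length then 1 else -1

-- ===== PORT B =====
-- Python's built-in lexicographic `<` on int sequences, ported exactly.
def pyListLt : List Int → List Int → Bool
  | _, [] => false
  | [], _ :: _ => true
  | a :: as, b :: bs => a < b || (a == b && pyListLt as bs)

def path_compare_alt (p1 : List Int) (p2 : List Int) : Int :=
  (if pyListLt p2 p1 then (1 : Int) else 0) - (if pyListLt p1 p2 then (1 : Int) else 0)

-- ===== PRECONDITION & SPEC =====
def Spec_path_compare (p1 : List Int) (p2 : List Int) (out : Int) : Prop := out = path_compare_alt p1 p2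
instance (p1 : List Int) (p2 : List Int) (out : Int) : Decidable (Spec_path_compare p1 p2 out) := by unfold Spec_path_compare; infer_instance

-- ===== CLAIM (what is proved, stated in full; the proofs are below) =====
def Claim_equal_path_compare : Prop := ∀ (p1 : List Int) (p2 : List Int), Dom_path_compare p1 p2 → Spec_path_compare p1 p2 (path_compare p1 p2)

-- ===== LEMMAS AND PROOFS =====
theorem path_compare_eq_alt (p1 p2 : List Int) : path_compare p1 p2 = path_compare_alt p1 p2 := by
  induction p1 generalizing p2 with
  | nil =>
      cases p2 <;> simp [path_compare, path_compare_alt, pyListLt]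
  | cons a as ih =>
      cases p2 with
      | nil => simp [path_compare, path_compare_alt, pyListLt]
      | cons b bs =>
          by_cases hgt : a > b
          · simp [path_compare, path_compare_alt, pyListLt, hgt, not_lt.mpr (le_of_lt hgt), hgt.ne']
          · by_cases hlt : a < b
            · simp [path_compare, path_compare_alt, pyListLt, hlt, hgt, hlt.ne']
            · have heq : a = b := le_antisymm (not_lt.mp hgt) (not_lt.mp hlt)
              subst heq
              simpa [path_compare, path_compare_alt, pyListLt] using ih bs

-- ===== VERDICT (by name: the statement is the Claim_ definition above) =====
theorem path_compare_spec : Claim_equal_path_compare := by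
  intro p1 p2 _
  unfold Spec_path_compare
  exact path_compare_eq_alt p1 p2
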